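-- pv_equiv track=rewrite | github.com/Altariox/Offline-voice-commands-for-Archlinux-using-Vosk | intents.py | _tokens_variants
-- ===== SOURCE A (Python) =====
-- from itertools import product
--
-- def _plural_toggle(token: str) -> set[str]:
--     if len(token) <= 2:
--         return {token}
--     if token.endswith("s"):
--         return {token, token[:-1]}
--     return {token, token + "s"}
--
-- def _tokens_variants(tokens: list[str]) -> set[str]:
--     if not tokens:
--         return set()
--     choices = [_plural_toggle(t) for t in tokens]
--     out: set[str] = set()
--     for combo in product(*choices):
--         out.add(" ".join(combo))
--     return out
-- ===== SOURCE B (Python) =====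
-- def _plural_toggle(token: str) -> set[str]:
--     if len(token) <= 2:
--         return {token}
--     if token.endswith("s"):
--         return {token, token[:-1]}
--     return {token, token + "s"}
--
-- def _tokens_variants(tokens: list[str]) -> set[str]:
--     if not tokens:
--         return set()
--     acc = _plural_toggle(tokens[0])
--     for t in tokens[1:]:
--         acc = {p + " " + v for p in acc for v in _plural_toggle(t)}
--     return acc
-- ===== Notes on version B (the rewrite author's own statement) =====
-- stated objective: alternative
-- what changed: Instead of materializing the full cartesian product of variant tuples with itertools.product and joining each tuple at the end, B folds over the tokens maintaining a set of incrementally-built partial strings, extending and deduplicating it one token at a time.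
import Mathlib
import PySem

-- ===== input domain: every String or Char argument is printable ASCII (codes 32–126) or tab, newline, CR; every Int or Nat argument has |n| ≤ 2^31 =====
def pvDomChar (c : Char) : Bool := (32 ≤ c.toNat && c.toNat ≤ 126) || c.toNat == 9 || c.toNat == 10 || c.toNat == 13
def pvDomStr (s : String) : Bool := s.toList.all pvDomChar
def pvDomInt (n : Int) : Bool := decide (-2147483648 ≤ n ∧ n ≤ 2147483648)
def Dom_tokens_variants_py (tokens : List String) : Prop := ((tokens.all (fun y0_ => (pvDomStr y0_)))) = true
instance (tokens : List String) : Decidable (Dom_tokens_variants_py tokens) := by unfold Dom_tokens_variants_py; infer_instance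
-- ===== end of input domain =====

-- B replaces the itertools.product-of-tuples pass by a left fold that keeps a set of
-- incrementally built partial strings (objective: alternative decomposition).

-- ===== PORT A =====
-- _plural_toggle (shared helper, identical in Source A and Source B)
def pluralToggle (token : String) : PySem.Set String :=
  if PySem.Str.len token ≤ 2 then PySem.Set.ofList [token]
  else if PySem.Str.endswith token "s" then
    PySem.Set.ofList [token, PySem.Str.slice token none (some (-1))]
  else PySem.Set.ofList [token, token ++ "s"]

-- itertools.product(*choices) over lists, in itertools' lexicographic order
def prodCombos : List (List String) → List (List String)
  | [] => [[]]
  | c :: cs => c.flatMap (fun x => (prodCombos cs).map (fun combo => x :: combo))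

def tokens_variants_py (tokens : List String) : List String :=
  match tokens with
  | [] => []
  | _ =>
    let choices := tokens.map pluralToggle
    ((prodCombos choices).map (fun combo => PySem.Str.join " " combo)).foldl PySem.Set.add []

-- ===== PORT B =====
def tokens_variants_py_alt (tokens : List String) : List String :=
  match tokens with
  | [] => []
  | t :: ts =>
    ts.foldl
      (fun acc u =>
        PySem.Set.ofList (acc.flatMap (fun p => (pluralToggle u).map (fun v => p ++ " " ++ v))))
      (pluralToggle t)

-- ===== PRECONDITION & SPEC =====
def Spec_tokens_variants_py (tokens : List String) (out : List String) : Prop := out = tokens_variants_py_alt tokens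
instance (tokens : List String) (out : List String) : Decidable (Spec_tokens_variants_py tokens out) := by unfold Spec_tokens_variants_py; infer_instance

-- ===== CLAIM (what is proved, stated in full; the proofs are below) =====
def Claim_equal_tokens_variants_py : Prop := ∀ (tokens : List String), Dom_tokens_variants_py tokens → Spec_tokens_variants_py tokens (tokens_variants_py tokens)

-- ===== LEMMAS AND PROOFS =====

theorem update_of_subset {α : Type} [DecidableEq α] (s : PySem.Set α) (m : List α)
    (h : ∀ b ∈ m, b ∈ s) : PySem.Set.update s m = s := by
  rw [PySem.Set.update_eq_append_filter]
  have : List.filter (fun y => !s.contains y) (PySem.Set.ofList m) = [] := by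
    rw [List.filter_eq_nil_iff]
    intro y hy
    have : y ∈ s := h y ((PySem.Set.mem_ofList m y).mp hy)
    simp [this]
  rw [this, List.append_nil]

theorem flatMap_congr' {α β : Type} (l : List α) (f g : α → List β)
    (h : ∀ x ∈ l, f x = g x) : l.flatMap f = l.flatMap g := by
  induction l with
  | nil => rfl
  | cons x xs ih =>
    simp only [List.flatMap_cons, h x (by simp), ih (fun y hy => h y (by simp [hy]))]

theorem ofList_flatMap_ofList {α β : Type} [DecidableEq α] [DecidableEq β]
    (xs : List α) (g : α → List β) :
    PySem.Set.ofList (xs.flatMap g) = PySem.Set.ofList ((PySem.Set.ofList xs).flatMap g) := by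
  induction xs using List.reverseRecOn with
  | nil => rfl
  | append_singleton xs x ih =>
    rw [List.flatMap_append, List.flatMap_singleton, PySem.Set.ofList_append,
      PySem.Set.ofList_append_singleton]
    by_cases hx : x ∈ xs
    · rw [PySem.Set.add_of_mem ((PySem.Set.mem_ofList xs x).mpr hx), ← ih]
      apply update_of_subset
      intro b hb
      exact (PySem.Set.mem_ofList _ b).mpr (List.mem_flatMap.mpr ⟨x, hx, hb⟩)
    · have hc : (PySem.Set.ofList xs).contains x = false := by
        rw [Bool.eq_false_iff]
        intro hcon
        exact hx ((PySem.Set.mem_ofList xs x).mp ((PySem.Set.contains_iff _ x).mp hcon))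
      have : (PySem.Set.ofList xs).add x = PySem.Set.ofList xs ++ [x] := by
        simp [PySem.Set.add, hx]
      rw [this, List.flatMap_append, List.flatMap_singleton, PySem.Set.ofList_append, ih]

theorem prod_append_singleton (cs : List (List String)) (c : List String) :
    prodCombos (cs ++ [c]) =
      (prodCombos cs).flatMap (fun combo => c.map (fun v => combo ++ [v])) := by
  induction cs with
  | nil =>
    simp only [List.nil_append, prodCombos, List.flatMap_cons, List.flatMap_nil,
      List.append_nil, List.map_cons, List.map_nil]
    induction c with
    | nil => rfl
    | cons x xs ihc => simp [ihc]
  | cons c' cs ih =>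
    simp [List.cons_append, prodCombos, ih, List.map_flatMap, List.flatMap_assoc,
      List.flatMap_map, List.map_map, Function.comp_def]

theorem join_singleton' (s : String) : PySem.Str.join " " [s] = s := by
  simp [PySem.Str.join, PySem.Chars.join_singleton]

theorem str_join_cons_cons (sep p q : String) (rest : List String) :
    PySem.Str.join sep (p :: q :: rest) = p ++ sep ++ PySem.Str.join sep (q :: rest) := by
  simp [PySem.Str.join, PySem.Chars.join_cons_cons, ← String.append_assoc]

theorem join_snoc (l : List String) (hl : l ≠ []) (v : String) :
    PySem.Str.join " " (l ++ [v]) = PySem.Str.join " " l ++ " " ++ v := by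
  match l with
  | [] => exact absurd rfl hl
  | p :: rest =>
    clear hl
    induction rest generalizing p with
    | nil => rw [List.cons_append, List.nil_append, str_join_cons_cons, join_singleton', join_singleton']
    | cons q rest ih =>
      simp only [List.cons_append]
      have ih' := ih q
      simp only [List.cons_append] at ih'
      rw [str_join_cons_cons " " p q (rest ++ [v]), ih', str_join_cons_cons " " p q rest]
      simp [String.append_assoc]

theorem mem_prod_ne_nil (c : List String) (cs : List (List String)) (combo : List String)
    (h : combo ∈ prodCombos (c :: cs)) : combo ≠ [] := by
  simp only [prodCombos, List.mem_flatMap, List.mem_map] at h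
  obtain ⟨x, _, rest, _, hr⟩ := h
  exact hr ▸ (by simp)

theorem nodup_pluralToggle (t : String) : (pluralToggle t).Nodup := by
  unfold pluralToggle; split_ifs <;> exact PySem.Set.nodup_ofList _

theorem main_lemma (t : String) (ts : List String) :
    PySem.Set.ofList ((prodCombos ((t :: ts).map pluralToggle)).map (fun combo => PySem.Str.join " " combo)) =
      ts.foldl
        (fun acc u =>
          PySem.Set.ofList (acc.flatMap (fun p => (pluralToggle u).map (fun v => p ++ " " ++ v))))
        (pluralToggle t) := by
  induction ts using List.reverseRecOn with
  | nil =>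
    have h1 : prodCombos [pluralToggle t] = (pluralToggle t).map (fun x => [x]) := by
      simp only [prodCombos]
      induction pluralToggle t with
      | nil => rfl
      | cons x xs ihc =>
        simp only [List.map_cons, List.map_nil] at ihc
        simp only [List.flatMap_cons, List.map_cons, List.map_nil, List.singleton_append, ihc]
    simp only [List.map_cons, List.map_nil, h1, List.map_map, Function.comp_def, List.foldl_nil]
    have h2 : (pluralToggle t).map (fun x => PySem.Str.join " " [x]) = pluralToggle t := by
      rw [List.map_congr_left (fun x _ => join_singleton' x), List.map_id']
    rw [h2]
    exact PySem.Set.ofList_eq_self_of_nodup _ (nodup_pluralToggle t)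
  | append_singleton ts u ih =>
    have hmap : (t :: (ts ++ [u])).map pluralToggle
        = (t :: ts).map pluralToggle ++ [pluralToggle u] := by simp
    rw [hmap, prod_append_singleton, List.map_flatMap, List.foldl_append, List.foldl_cons,
      List.foldl_nil, ← ih]
    have h1 : (prodCombos ((t :: ts).map pluralToggle)).flatMap
          (fun combo => ((pluralToggle u).map (fun v => combo ++ [v])).map (fun combo => PySem.Str.join " " combo))
        = (prodCombos ((t :: ts).map pluralToggle)).flatMap
          (fun combo => (pluralToggle u).map (fun v => PySem.Str.join " " combo ++ " " ++ v)) := by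
      apply flatMap_congr'
      intro combo hc
      rw [List.map_map]
      apply List.map_congr_left
      intro v _
      exact join_snoc combo (mem_prod_ne_nil _ _ _ (by simpa using hc)) v
    rw [h1]
    have h2 : (prodCombos ((t :: ts).map pluralToggle)).flatMap
          (fun combo => (pluralToggle u).map (fun v => PySem.Str.join " " combo ++ " " ++ v))
        = ((prodCombos ((t :: ts).map pluralToggle)).map (fun combo => PySem.Str.join " " combo)).flatMap
          (fun p => (pluralToggle u).map (fun v => p ++ " " ++ v)) := by
      rw [List.flatMap_map]
    rw [h2]
    exact ofList_flatMap_ofList _ _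

-- ===== VERDICT (by name: the statement is the Claim_ definition above) =====
theorem tokens_variants_py_spec : Claim_equal_tokens_variants_py := by
  intro tokens _
  unfold Spec_tokens_variants_py tokens_variants_py tokens_variants_py_alt
  match tokens with
  | [] => rfl
  | t :: ts =>
    simp only
    rw [← PySem.Set.ofList_eq_foldl]
    exact main_lemma t ts
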